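-- pv_equiv track=rewrite | github.com/vangeeteruyenf-coder/cmef-x-bitvavo | cmef_x_bitvavo_app.py | resolve_coingecko_id_from_name
-- ===== SOURCE A (Python) =====
-- def resolve_coingecko_id_from_name(coin_list, coin_name):
--     if not coin_list:
--         return None
--     # try exact name match (case-insensitive)
--     cn = coin_name.strip().lower()
--     exact = [c for c in coin_list if c.get("name","").strip().lower() == cn]
--     if exact:
--         return exact[0]['id']
--     # try symbol match where coin_name might be symbol
--     sym = coin_name.strip().lower()
--     symmatches = [c for c in coin_list if c.get("symbol","").lower() == sym]
--     if len(symmatches) == 1: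
--         return symmatches[0]['id']
--     # try partial name contains
--     partial = [c for c in coin_list if cn in c.get("name","").lower()]
--     if partial:
--         return partial[0]['id']
--     # fallback None
--     return None
-- ===== SOURCE B (Python) =====
-- def resolve_coingecko_id_from_name(coin_list, coin_name):
--     # Single pass: remember first exact-name coin, first symbol match + count, first partial-name coin.
--     if not coin_list:
--         return None
--     cn = coin_name.strip().lower()
--     exact = sym = part = None
--     sym_count = 0
--     for c in coin_list:
--         if exact is None and c.get("name", "").strip().lower() == cn:
--             exact = c
--         if c.get("symbol", "").lower() == cn:
--             sym_count += 1
--             if sym_count == 1: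
--                 sym = c
--         if part is None and cn in c.get("name", "").lower():
--             part = c
--     if exact is not None:
--         return exact['id']
--     if sym_count == 1:
--         return sym['id']
--     if part is not None:
--         return part['id']
--     return None
-- ===== Notes on version B (the rewrite author's own statement) =====
-- stated objective: alternative
-- what changed: Replaces A's three full filter passes (exact name, symbol, partial name) by a single pass over coin_list that maintains the first exact-name coin, the first symbol-matching coin with a running count, and the first partial-name coin, deciding the winner only after the loop.
import Mathlib
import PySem

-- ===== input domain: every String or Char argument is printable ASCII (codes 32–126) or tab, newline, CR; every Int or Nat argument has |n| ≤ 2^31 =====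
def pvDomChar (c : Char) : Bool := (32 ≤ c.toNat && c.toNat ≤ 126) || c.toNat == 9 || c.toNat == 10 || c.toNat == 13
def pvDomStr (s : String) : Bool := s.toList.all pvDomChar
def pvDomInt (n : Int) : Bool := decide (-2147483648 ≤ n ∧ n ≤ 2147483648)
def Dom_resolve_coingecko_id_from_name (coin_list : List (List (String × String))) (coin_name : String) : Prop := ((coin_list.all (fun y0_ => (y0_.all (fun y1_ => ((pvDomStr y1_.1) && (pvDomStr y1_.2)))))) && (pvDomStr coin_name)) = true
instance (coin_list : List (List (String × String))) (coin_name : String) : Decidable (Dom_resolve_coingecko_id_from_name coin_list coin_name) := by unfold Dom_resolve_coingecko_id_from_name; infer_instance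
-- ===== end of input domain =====

-- B replaces A's three filter passes by a single scan keeping first exact/symbol(+count)/partial matches (alternative decomposition).


-- shared match predicates (c.get(...) normalisation, exactly A's expressions) and 'id' lookup
def pvIsExact (cn : String) (c : List (String × String)) : Bool :=
  PySem.Str.lower (PySem.Str.strip ((PySem.Dict.mk c).getD "name" "")) == cn
def pvIsSym (cn : String) (c : List (String × String)) : Bool :=
  PySem.Str.lower ((PySem.Dict.mk c).getD "symbol" "") == cn
def pvIsPartial (cn : String) (c : List (String × String)) : Bool :=
  PySem.Str.isIn cn (PySem.Str.lower ((PySem.Dict.mk c).getD "name" ""))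
def pvId (c : List (String × String)) : Option String := (PySem.Dict.mk c).get? "id"

-- ===== PORT A =====
def resolve_coingecko_id_from_name (coin_list : List (List (String × String))) (coin_name : String) : Option String :=
  if coin_list = [] then none
  else
    let cn := PySem.Str.lower (PySem.Str.strip coin_name)
    let exact := coin_list.filter (pvIsExact cn)
    match exact with
    | c :: _ => pvId c
    | [] =>
      let sym := PySem.Str.lower (PySem.Str.strip coin_name)
      let symmatches := coin_list.filter (pvIsSym sym)
      if symmatches.length = 1 then
        match symmatches with
        | c :: _ => pvId c
        | [] => none
      else
        let part := coin_list.filter (pvIsPartial cn)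
        match part with
        | c :: _ => pvId c
        | [] => none

-- ===== PORT B =====
-- loop state: (first exact coin, first symbol coin, symbol count, first partial coin)
def pvStep (cn : String)
    (st : Option (List (String × String)) × Option (List (String × String)) × Nat × Option (List (String × String)))
    (c : List (String × String)) :
    Option (List (String × String)) × Option (List (String × String)) × Nat × Option (List (String × String)) :=
  let (e, s, k, p) := st
  let e' := if e.isNone && pvIsExact cn c then some c else e
  let sk' := if pvIsSym cn c then ((if k + 1 = 1 then some c else s), k + 1) else (s, k)
  let p' := if p.isNone && pvIsPartial cn c then some c else p
  (e', sk'.1, sk'.2, p')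

def resolve_coingecko_id_from_name_alt (coin_list : List (List (String × String))) (coin_name : String) : Option String :=
  if coin_list = [] then none
  else
    let cn := PySem.Str.lower (PySem.Str.strip coin_name)
    let st := coin_list.foldl (pvStep cn) (none, none, 0, none)
    match st.1 with
    | some c => pvId c
    | none =>
      if st.2.2.1 = 1 then
        match st.2.1 with
        | some c => pvId c
        | none => none
      else
        match st.2.2.2 with
        | some c => pvId c
        | none => none

-- ===== PRECONDITION & SPEC =====
-- Pre_ excludes exactly the inputs where the Python raises KeyError: the coin the search selects lacks an 'id' key
-- (both Pythons raise there; the ports return none there, so the equivalence below holds regardless).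
def Pre_resolve_coingecko_id_from_name (coin_list : List (List (String × String))) (coin_name : String) : Prop :=
  (let cn := PySem.Str.lower (PySem.Str.strip coin_name)
   match coin_list.find? (pvIsExact cn) with
   | some c => (pvId c).isSome
   | none =>
     if coin_list.countP (pvIsSym cn) = 1 then
       (coin_list.find? (pvIsSym cn)).all (fun c => (pvId c).isSome)
     else
       (coin_list.find? (pvIsPartial cn)).all (fun c => (pvId c).isSome)) = true
instance (coin_list : List (List (String × String))) (coin_name : String) : Decidable (Pre_resolve_coingecko_id_from_name coin_list coin_name) := by unfold Pre_resolve_coingecko_id_from_name; infer_instance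

def pvWitness_resolve_coingecko_id_from_name : (List (List (String × String))) × String :=
  ([[("name", "Bitcoin"), ("symbol", "btc"), ("id", "bitcoin")]], "bitcoin")

def Spec_resolve_coingecko_id_from_name (coin_list : List (List (String × String))) (coin_name : String) (out : Option String) : Prop := out = resolve_coingecko_id_from_name_alt coin_list coin_name
instance (coin_list : List (List (String × String))) (coin_name : String) (out : Option String) : Decidable (Spec_resolve_coingecko_id_from_name coin_list coin_name out) := by unfold Spec_resolve_coingecko_id_from_name; infer_instance

-- ===== CLAIM (what is proved, stated in full; the proofs are below) =====
def Claim_equal_resolve_coingecko_id_from_name : Prop := ∀ (coin_list : List (List (String × String))) (coin_name : String), Dom_resolve_coingecko_id_from_name coin_list coin_name → Pre_resolve_coingecko_id_from_name coin_list coin_name → Spec_resolve_coingecko_id_from_name coin_list coin_name (resolve_coingecko_id_from_name coin_list coin_name)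

-- ===== LEMMAS AND PROOFS =====
-- loop invariant: the fold computes first-match/first-match+count/first-match of the three predicates
theorem pvStep_foldl (cn : String) (l : List (List (String × String)))
    (e s : Option (List (String × String))) (k : Nat) (p : Option (List (String × String)))
    (hs : s = none ↔ k = 0) :
    l.foldl (pvStep cn) (e, s, k, p) =
      (e.or (l.find? (pvIsExact cn)),
       s.or (l.find? (pvIsSym cn)),
       k + (l.filter (pvIsSym cn)).length,
       p.or (l.find? (pvIsPartial cn))) := by
  induction l generalizing e s k p with
  | nil => cases s <;> simp_all
  | cons c t ih =>
    simp only [List.foldl_cons, List.filter_cons, List.find?_cons, pvStep]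
    by_cases hq : pvIsSym cn c
    · have hnext : ((if k + 1 = 1 then some c else s) = none ↔ k + 1 = 0) := by
        constructor
        · intro h
          by_cases h1 : k + 1 = 1
          · simp [h1] at h
          · rw [if_neg h1] at h
            exact absurd (hs.mp h) (by omega)
        · intro h; omega
      simp only [hq, if_true]
      rw [ih _ _ _ _ hnext]
      clear ih
      simp only [Prod.mk.injEq]
      refine ⟨?_, ?_, ?_, ?_⟩
      · cases e <;> cases h1 : pvIsExact cn c <;> simp [Option.or]
      · cases s with
        | none =>
          have hk : k = 0 := hs.mp rfl
          simp [hk, Option.or]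
        | some v =>
          have hk : k ≠ 0 := fun h => by simpa using hs.mpr h
          rw [if_neg (by omega : ¬ (k + 1 = 1))]
          simp [Option.or]
      · simp [List.length_cons]; omega
      · cases p <;> cases h2 : pvIsPartial cn c <;> simp [Option.or]
    · rw [Bool.not_eq_true] at hq
      simp only [hq, Bool.false_eq_true, if_false]
      rw [ih _ _ _ _ hs]
      clear ih
      cases e <;> cases p <;> cases h1 : pvIsExact cn c <;> cases h2 : pvIsPartial cn c <;>
        simp [Option.or]

-- ===== VERDICT (by name: the statement is the Claim_ definition above) =====
theorem resolve_coingecko_id_from_name_spec : Claim_equal_resolve_coingecko_id_from_name := by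
  intro coin_list coin_name _ _
  unfold Spec_resolve_coingecko_id_from_name resolve_coingecko_id_from_name resolve_coingecko_id_from_name_alt
  by_cases hnil : coin_list = []
  · simp [hnil]
  · simp only [hnil, if_false]
    rw [pvStep_foldl _ _ _ _ _ _ (by simp)]
    simp only [Option.or, ← List.head?_filter, Nat.zero_add]
    set cn := PySem.Str.lower (PySem.Str.strip coin_name) with hcn
    cases hex : coin_list.filter (pvIsExact cn) with
    | cons c t => simp
    | nil =>
      simp only [List.head?_nil]
      by_cases hlen : (coin_list.filter (pvIsSym cn)).length = 1
      · cases hsym : coin_list.filter (pvIsSym cn) with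
        | nil => rw [hsym] at hlen; simp at hlen
        | cons c t =>
          rw [hsym] at hlen
          cases t with
          | nil => simp [hlen]
          | cons d u => simp at hlen
      · simp only [hlen, if_false]
        cases hpart : coin_list.filter (pvIsPartial cn) <;> simp
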